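-- pv_equiv track=rewrite | github.com/dokDork/odd-Header-Hunter | engine/check-http-header.py | is_header_standard
-- ===== SOURCE A (Python) =====
-- def is_header_standard(line, standard_headers):
--     """
--     Checks if the line contains any standard header substring (case-insensitive).
--     Returns True if standard, False otherwise.
--
--     Lines containing "HTTP/", "GET ", or "POST " are not considered headers and always return True.
--     """
--     line_lower = line.lower()
--
--     # Skip lines that are not headers
--     if any(x in line_lower for x in ("http/", "get ", "post ")):
--         return True
--
--     for std_header in standard_headers:
--         if std_header in line_lower:
--             return True
--     return False
-- ===== SOURCE B (Python) =====
-- def is_header_standard(line, standard_headers):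
--     # Alternative algorithm: index the patterns once by first character (deduplicated),
--     # then make a single position-major scan of the lowered line, testing at each
--     # position only the patterns that could start there.
--     s = line.lower()
--     pats = ["http/", "get ", "post "] + list(standard_headers)
--     buckets = {}
--     for p in pats:
--         if p == "":
--             return True  # the empty pattern occurs in every string
--         buckets.setdefault(p[0], set()).add(p)
--     for i, c in enumerate(s):
--         for p in buckets.get(c, ()):
--             if s.startswith(p, i):
--                 return True
--     return False
-- ===== Notes on version B (the rewrite author's own statement) =====
-- stated objective: alternative
-- what changed: A's pattern-major loop of one full substring search per pattern is replaced by a first-character index built once over the deduplicated patterns plus a single position-major scan of the lowered line that tests only the patterns whose first character matches the current position.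
import Mathlib
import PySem

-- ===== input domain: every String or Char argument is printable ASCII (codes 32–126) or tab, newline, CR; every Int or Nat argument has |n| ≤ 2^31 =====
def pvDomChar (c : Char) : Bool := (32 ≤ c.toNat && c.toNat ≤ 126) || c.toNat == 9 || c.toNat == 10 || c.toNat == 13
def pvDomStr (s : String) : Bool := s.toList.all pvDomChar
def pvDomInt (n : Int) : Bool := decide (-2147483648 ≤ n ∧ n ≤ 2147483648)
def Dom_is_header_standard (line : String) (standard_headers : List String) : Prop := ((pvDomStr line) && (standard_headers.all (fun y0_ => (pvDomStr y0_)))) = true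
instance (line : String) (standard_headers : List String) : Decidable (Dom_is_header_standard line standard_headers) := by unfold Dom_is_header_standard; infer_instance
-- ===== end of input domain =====

-- B replaces A's pattern-major per-pattern substring searches by a first-character index over the
-- deduplicated patterns plus one position-major scan of the lowered line (objective: alternative).


-- ===== PORT A =====
-- the 'for std_header in standard_headers: if std_header in line_lower: return True' loop
def aHeaderLoop (hs : List String) (ll : String) : Bool :=
  match hs with
  | [] => false
  | h :: t => if PySem.Str.isIn h ll then true else aHeaderLoop t ll

def is_header_standard (line : String) (standard_headers : List String) : Bool :=
  let line_lower := PySem.Str.lower line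
  if ["http/", "get ", "post "].any (fun x => PySem.Str.isIn x line_lower) then true
  else aHeaderLoop standard_headers line_lower

-- ===== PORT B =====
-- 'for p in pats: if p == "": return True; buckets.setdefault(p[0], set()).add(p)'
-- (none = the early 'return True' on an empty pattern)
def bBuild (pats : List (List Char)) (d : PySem.Dict Char (PySem.Set (List Char))) :
    Option (PySem.Dict Char (PySem.Set (List Char))) :=
  match pats with
  | [] => some d
  | p :: rest =>
      match p with
      | [] => none
      | c :: _ => bBuild rest (d.insert c (PySem.Set.add (d.getD c []) p))

-- 'for i, c in enumerate(s): for p in buckets.get(c, ()): if s.startswith(p, i): return True'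
-- (s.startswith(p, i) is: p is a prefix of the suffix of s at i — the recursion carries that suffix)
def bScan (s : List Char) (d : PySem.Dict Char (PySem.Set (List Char))) : Bool :=
  match s with
  | [] => false
  | c :: rest =>
      if (d.getD c []).any (fun p => PySem.Chars.startswith (c :: rest) p) then true
      else bScan rest d

def is_header_standard_alt (line : String) (standard_headers : List String) : Bool :=
  let s := PySem.Chars.lower line.toList
  let pats := ["http/", "get ", "post "].map String.toList ++ standard_headers.map String.toList
  match bBuild pats PySem.Dict.empty with
  | none => true
  | some buckets => bScan s buckets

-- ===== PRECONDITION & SPEC =====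
def Spec_is_header_standard (line : String) (standard_headers : List String) (out : Bool) : Prop := out = is_header_standard_alt line standard_headers
instance (line : String) (standard_headers : List String) (out : Bool) : Decidable (Spec_is_header_standard line standard_headers out) := by unfold Spec_is_header_standard; infer_instance

-- ===== CLAIM (what is proved, stated in full; the proofs are below) =====
def Claim_equal_is_header_standard : Prop := ∀ (line : String) (standard_headers : List String), Dom_is_header_standard line standard_headers → Spec_is_header_standard line standard_headers (is_header_standard line standard_headers)

-- ===== LEMMAS AND PROOFS =====

-- A's header loop is an any over the headers (stated on the code-point side)
theorem aHeaderLoop_eq_true_iff (hs : List String) (ll : String) :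
    aHeaderLoop hs ll = true ↔ ∃ h ∈ hs, PySem.Chars.isIn h.toList ll.toList = true := by
  induction hs with
  | nil => simp [aHeaderLoop]
  | cons h t ih =>
      simp only [aHeaderLoop]
      rw [show PySem.Str.isIn h ll = PySem.Chars.isIn h.toList ll.toList by
        simp [PySem.Str.isIn_eq]]
      split_ifs with hh
      · simp only [true_iff]
        exact ⟨h, List.mem_cons_self, hh⟩
      · rw [ih]
        constructor
        · rintro ⟨x, hx, hin⟩
          exact ⟨x, List.mem_cons_of_mem _ hx, hin⟩
        · rintro ⟨x, hx, hin⟩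
          rcases List.mem_cons.1 hx with rfl | hx
          · exact absurd hin hh
          · exact ⟨x, hx, hin⟩

-- A's whole result, as one any over all patterns
theorem is_header_standard_eq_true_iff (line : String) (hs : List String) :
    is_header_standard line hs = true ↔
      ∃ p ∈ ["http/", "get ", "post "].map String.toList ++ hs.map String.toList,
        PySem.Chars.isIn p (PySem.Chars.lower line.toList) = true := by
  unfold is_header_standard
  simp only
  have hlow : (PySem.Str.lower line).toList = PySem.Chars.lower line.toList :=
    PySem.Str.toList_lower line
  split_ifs with hfix
  · simp only [true_iff]
    obtain ⟨x, hx, hin⟩ := List.any_eq_true.1 hfix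
    rw [show PySem.Str.isIn x (PySem.Str.lower line)
          = PySem.Chars.isIn x.toList (PySem.Str.lower line).toList by
        simp [PySem.Str.isIn_eq], hlow] at hin
    exact ⟨x.toList, List.mem_append_left _ (List.mem_map_of_mem hx), hin⟩
  · rw [aHeaderLoop_eq_true_iff, hlow]
    constructor
    · rintro ⟨h, hh, hin⟩
      exact ⟨h.toList, List.mem_append_right _ (List.mem_map_of_mem hh), hin⟩
    · rintro ⟨p, hp, hin⟩
      rcases List.mem_append.1 hp with hp | hp
      · exfalso
        obtain ⟨x, hx, rfl⟩ := List.mem_map.1 hp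
        refine hfix (List.any_eq_true.2 ⟨x, hx, ?_⟩)
        rw [show PySem.Str.isIn x (PySem.Str.lower line)
              = PySem.Chars.isIn x.toList (PySem.Str.lower line).toList by
            simp [PySem.Str.isIn_eq], hlow]
        exact hin
      · obtain ⟨h, hh, rfl⟩ := List.mem_map.1 hp
        exact ⟨h, hh, hin⟩

theorem bBuild_eq_none_iff (pats : List (List Char))
    (d : PySem.Dict Char (PySem.Set (List Char))) :
    bBuild pats d = none ↔ [] ∈ pats := by
  induction pats generalizing d with
  | nil => simp [bBuild]
  | cons p rest ih =>
      cases p with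
      | nil => simp [bBuild]
      | cons c cs => simp [bBuild, ih]

-- the bucket of c holds exactly d's bucket plus the processed patterns starting with c
theorem bBuild_getD_mem (pats : List (List Char))
    (d d' : PySem.Dict Char (PySem.Set (List Char)))
    (hb : bBuild pats d = some d') (c : Char) (q : List Char) :
    q ∈ d'.getD c [] ↔ q ∈ d.getD c [] ∨ (q ∈ pats ∧ q.head? = some c) := by
  induction pats generalizing d with
  | nil =>
      simp only [bBuild, Option.some.injEq] at hb
      subst hb
      simp
  | cons p rest ih =>
      cases p with
      | nil => simp [bBuild] at hb
      | cons a as =>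
          simp only [bBuild] at hb
          rw [ih _ hb]
          rw [PySem.Dict.getD_insert]
          by_cases hca : c = a
          · rw [if_pos hca]
            subst hca
            rw [PySem.Set.mem_add]
            constructor
            · rintro ((h | rfl) | ⟨hmem, hhd⟩)
              · exact Or.inl h
              · exact Or.inr ⟨List.mem_cons_self, rfl⟩
              · exact Or.inr ⟨List.mem_cons_of_mem _ hmem, hhd⟩
            · rintro (h | ⟨hmem, hhd⟩)
              · exact Or.inl (Or.inl h)
              · rcases List.mem_cons.1 hmem with rfl | hmem
                · exact Or.inl (Or.inr rfl)
                · exact Or.inr ⟨hmem, hhd⟩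
          · simp only [if_neg hca]
            constructor
            · rintro (h | ⟨hmem, hhd⟩)
              · exact Or.inl h
              · exact Or.inr ⟨List.mem_cons_of_mem _ hmem, hhd⟩
            · rintro (h | ⟨hmem, hhd⟩)
              · exact Or.inl h
              · rcases List.mem_cons.1 hmem with rfl | hmem
                · simp only [List.head?_cons, Option.some.injEq] at hhd
                  exact absurd hhd.symm hca
                · exact Or.inr ⟨hmem, hhd⟩

theorem bScan_eq_true_iff (s : List Char) (d : PySem.Dict Char (PySem.Set (List Char))) :
    bScan s d = true ↔
      ∃ (j : Nat) (h : j < s.length), ∃ p ∈ d.getD s[j] [], p <+: s.drop j := by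
  induction s with
  | nil => simp [bScan]
  | cons c rest ih =>
      simp only [bScan]
      split_ifs with hhit
      · simp only [true_iff]
        obtain ⟨p, hp, hpre⟩ := List.any_eq_true.1 hhit
        exact ⟨0, by simp, p, hp, by simpa [PySem.Chars.startswith_iff] using hpre⟩
      · rw [ih]
        constructor
        · rintro ⟨j, hj, p, hp, hpre⟩
          exact ⟨j + 1, by simpa using hj, p, by simpa using hp, by simpa using hpre⟩
        · rintro ⟨j, hj, p, hp, hpre⟩
          cases j with
          | zero =>
              exfalso
              refine hhit (List.any_eq_true.2 ⟨p, by simpa using hp, ?_⟩)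
              simpa [PySem.Chars.startswith_iff] using hpre
          | succ j' =>
              exact ⟨j', by simpa using hj, p, by simpa using hp, by simpa using hpre⟩

-- ===== VERDICT (by name: the statement is the Claim_ definition above) =====
theorem is_header_standard_spec : Claim_equal_is_header_standard := by
  intro line standard_headers _
  unfold Spec_is_header_standard
  rw [Bool.eq_iff_iff, is_header_standard_eq_true_iff]
  unfold is_header_standard_alt
  simp only
  set s := PySem.Chars.lower line.toList with hs
  set pats := ["http/", "get ", "post "].map String.toList
      ++ standard_headers.map String.toList with hpats
  rcases hb : bBuild pats PySem.Dict.empty with _ | d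
  · -- some pattern is empty: both sides are true
    have hnil : [] ∈ pats := (bBuild_eq_none_iff _ _).1 hb
    simp only [iff_true]
    exact ⟨[], hnil, PySem.Chars.isIn_nil s⟩
  · rw [bScan_eq_true_iff]
    constructor
    · rintro ⟨p, hp, hin⟩
      cases p with
      | nil =>
          exfalso
          have := (bBuild_eq_none_iff pats PySem.Dict.empty).2 hp
          rw [hb] at this; simp at this
      | cons a as =>
          obtain ⟨j, hj⟩ := (PySem.Chars.exists_prefix_drop_iff_isIn _ s).2 hin
          have hjlt : j < s.length := by
            by_contra hge
            rw [List.drop_eq_nil_of_le (by omega)] at hj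
            exact absurd (List.prefix_nil.1 hj) (by simp)
          have hhead : s[j] = a := by
            have hdrop : s.drop j = s[j] :: s.drop (j + 1) :=
              (List.drop_eq_getElem_cons hjlt)
            rw [hdrop] at hj
            exact ((List.cons_prefix_cons.1 hj).1).symm
          refine ⟨j, hjlt, a :: as, ?_, hj⟩
          rw [bBuild_getD_mem pats _ d hb]
          exact Or.inr ⟨hp, by simp [hhead]⟩
    · rintro ⟨j, hj, p, hp, hpre⟩
      rw [bBuild_getD_mem pats _ d hb] at hp
      rcases hp with hp | ⟨hmem, _⟩
      · simp [PySem.Dict.getD_empty] at hp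
      · exact ⟨p, hmem, (PySem.Chars.exists_prefix_drop_iff_isIn _ s).1 ⟨j, hpre⟩⟩
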